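-- pv_equiv track=rewrite | github.com/dompuiu/spotifyleave | server/ytmusic_load.py | locate_playlist_song_index
-- ===== SOURCE A (Python) =====
-- from typing import Any, NoReturn, cast
--
-- def safe_str(value: Any) -> str:
--     return value.strip() if isinstance(value, str) else ""
--
-- def locate_playlist_song_index(
--     tracks: list[Any], song_ref: dict[str, str]
-- ) -> tuple[int, str]:
--     target_set_video_id = safe_str(song_ref.get("setVideoId"))
--     if target_set_video_id:
--         for index, track in enumerate(tracks):
--             if not isinstance(track, dict):
--                 continue
--             candidate_set_video_id = safe_str(track.get("setVideoId"))
--             if candidate_set_video_id == target_set_video_id: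
--                 return index, candidate_set_video_id
--
--     target_video_id = safe_str(song_ref.get("videoId"))
--     if target_video_id:
--         for index, track in enumerate(tracks):
--             if not isinstance(track, dict):
--                 continue
--             candidate_video_id = safe_str(track.get("videoId"))
--             candidate_set_video_id = safe_str(track.get("setVideoId"))
--             if candidate_video_id == target_video_id and candidate_set_video_id:
--                 return index, candidate_set_video_id
--
--     return -1, ""
-- ===== SOURCE B (Python) =====
-- from typing import Any
--
--
-- def safe_str(value: Any) -> str:
--     return value.strip() if isinstance(value, str) else ""
--
--
-- def locate_playlist_song_index(tracks, song_ref):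
--     target_set_video_id = safe_str(song_ref.get("setVideoId"))
--     target_video_id = safe_str(song_ref.get("videoId"))
--     candidate = None
--     for index, track in enumerate(tracks):
--         if not isinstance(track, dict):
--             continue
--         set_video_id = safe_str(track.get("setVideoId"))
--         if target_set_video_id and set_video_id == target_set_video_id:
--             return index, set_video_id
--         if (candidate is None and target_video_id
--                 and safe_str(track.get("videoId")) == target_video_id
--                 and set_video_id):
--             candidate = (index, set_video_id)
--     return candidate if candidate is not None else (-1, "")
-- ===== Notes on version B (the rewrite author's own statement) =====
-- stated objective: simpler
-- what changed: Replaces A's two sequential scans over tracks by one scan that returns a setVideoId match immediately and records the first videoId match as a candidate returned after the loop.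
import Mathlib
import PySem

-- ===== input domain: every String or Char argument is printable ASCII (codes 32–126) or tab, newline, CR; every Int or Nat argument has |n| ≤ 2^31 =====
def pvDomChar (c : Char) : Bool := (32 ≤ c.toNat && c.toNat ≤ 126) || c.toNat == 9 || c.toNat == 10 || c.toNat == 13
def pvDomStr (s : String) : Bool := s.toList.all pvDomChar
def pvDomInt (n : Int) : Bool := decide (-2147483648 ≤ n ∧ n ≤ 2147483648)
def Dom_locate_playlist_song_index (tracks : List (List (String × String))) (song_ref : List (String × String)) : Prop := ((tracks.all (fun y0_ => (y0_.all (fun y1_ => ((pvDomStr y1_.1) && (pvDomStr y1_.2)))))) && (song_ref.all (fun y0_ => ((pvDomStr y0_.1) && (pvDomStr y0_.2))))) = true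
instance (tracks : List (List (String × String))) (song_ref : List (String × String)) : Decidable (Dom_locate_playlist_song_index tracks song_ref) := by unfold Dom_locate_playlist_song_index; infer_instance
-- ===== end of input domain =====

-- B replaces A's two sequential scans of tracks by one scan that returns a
-- setVideoId match immediately and records the first videoId match as a
-- candidate returned after the loop; same return value, proved equivalent.

-- ===== PORT A =====
-- safe_str: strip when str; values here are always strings, None -> ""
def pySafeStr (v : Option String) : String :=
  match v with
  | some s => PySem.Str.strip s
  | none => ""

-- first loop of A: first track whose stripped setVideoId equals tgt
def aLoopSet (tgt : String) : List (List (String × String)) → Int → Option (Int × String)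
  | [], _ => none
  | t :: ts, i =>
    let cand := pySafeStr (PySem.Dict.get? (PySem.Dict.mk t) "setVideoId")
    if cand = tgt then some (i, cand) else aLoopSet tgt ts (i + 1)

-- second loop of A: first track whose stripped videoId equals tgt and whose stripped setVideoId is truthy
def aLoopVid (tgt : String) : List (List (String × String)) → Int → Option (Int × String)
  | [], _ => none
  | t :: ts, i =>
    let cv := pySafeStr (PySem.Dict.get? (PySem.Dict.mk t) "videoId")
    let cs := pySafeStr (PySem.Dict.get? (PySem.Dict.mk t) "setVideoId")
    if cv = tgt ∧ cs ≠ "" then some (i, cs) else aLoopVid tgt ts (i + 1)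

def locate_playlist_song_index (tracks : List (List (String × String))) (song_ref : List (String × String)) : Int × String :=
  let tgtSet := pySafeStr (PySem.Dict.get? (PySem.Dict.mk song_ref) "setVideoId")
  match (if tgtSet ≠ "" then aLoopSet tgtSet tracks 0 else none) with
  | some p => p
  | none =>
    let tgtVid := pySafeStr (PySem.Dict.get? (PySem.Dict.mk song_ref) "videoId")
    match (if tgtVid ≠ "" then aLoopVid tgtVid tracks 0 else none) with
    | some p => p
    | none => (-1, "")

-- ===== PORT B =====
-- single scan carrying the recorded videoId candidate
def bLoop (tgtSet tgtVid : String) : List (List (String × String)) → Int → Option (Int × String) → Int × String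
  | [], _, cand => cand.getD (-1, "")
  | t :: ts, i, cand =>
    let sv := pySafeStr (PySem.Dict.get? (PySem.Dict.mk t) "setVideoId")
    if tgtSet ≠ "" ∧ sv = tgtSet then (i, sv)
    else
      let cand' :=
        if cand = none ∧ tgtVid ≠ "" ∧ pySafeStr (PySem.Dict.get? (PySem.Dict.mk t) "videoId") = tgtVid ∧ sv ≠ "" then
          some (i, sv)
        else cand
      bLoop tgtSet tgtVid ts (i + 1) cand'

def locate_playlist_song_index_alt (tracks : List (List (String × String))) (song_ref : List (String × String)) : Int × String :=
  let tgtSet := pySafeStr (PySem.Dict.get? (PySem.Dict.mk song_ref) "setVideoId")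
  let tgtVid := pySafeStr (PySem.Dict.get? (PySem.Dict.mk song_ref) "videoId")
  bLoop tgtSet tgtVid tracks 0 none

-- ===== PRECONDITION & SPEC =====
def Spec_locate_playlist_song_index (tracks : List (List (String × String))) (song_ref : List (String × String)) (out : Int × String) : Prop := out = locate_playlist_song_index_alt tracks song_ref
instance (tracks : List (List (String × String))) (song_ref : List (String × String)) (out : Int × String) : Decidable (Spec_locate_playlist_song_index tracks song_ref out) := by unfold Spec_locate_playlist_song_index; infer_instance

-- ===== CLAIM (what is proved, stated in full; the proofs are below) =====
def Claim_equal_locate_playlist_song_index : Prop := ∀ (tracks : List (List (String × String))) (song_ref : List (String × String)), Dom_locate_playlist_song_index tracks song_ref → Spec_locate_playlist_song_index tracks song_ref (locate_playlist_song_index tracks song_ref)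

-- ===== LEMMAS AND PROOFS =====
-- loop invariant: one scan with a candidate equals A's two scans with the
-- candidate standing for a videoId match found in the already-consumed prefix
lemma bLoop_eq (tgtSet tgtVid : String) (ts : List (List (String × String))) (i : Int)
    (cand : Option (Int × String)) :
    bLoop tgtSet tgtVid ts i cand =
      match (if tgtSet ≠ "" then aLoopSet tgtSet ts i else none) with
      | some p => p
      | none =>
        match cand with
        | some c => c
        | none =>
          match (if tgtVid ≠ "" then aLoopVid tgtVid ts i else none) with
          | some p => p
          | none => (-1, "") := by
  induction ts generalizing i cand with
  | nil =>
    simp [bLoop, aLoopSet, aLoopVid]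
    cases cand <;> simp [Option.getD]
  | cons t ts ih =>
    simp only [bLoop, aLoopSet, aLoopVid]
    by_cases hS : tgtSet = "" <;>
    by_cases hsv : pySafeStr (PySem.Dict.get? (PySem.Dict.mk t) "setVideoId") = tgtSet <;>
    by_cases hV : tgtVid = "" <;>
    by_cases hvv : pySafeStr (PySem.Dict.get? (PySem.Dict.mk t) "videoId") = tgtVid ∧
        pySafeStr (PySem.Dict.get? (PySem.Dict.mk t) "setVideoId") ≠ "" <;>
    cases cand <;>
    simp [ih, hS, hsv, hV, hvv] <;>
    try simp_all

-- ===== VERDICT (by name: the statement is the Claim_ definition above) =====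
theorem locate_playlist_song_index_spec : Claim_equal_locate_playlist_song_index := by
  intro tracks song_ref _
  unfold Spec_locate_playlist_song_index locate_playlist_song_index locate_playlist_song_index_alt
  rw [bLoop_eq]
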